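-- pv_equiv track=rewrite | github.com/MrBrantCode/unitest_baseline | mut_generate/mist_train_cf/cf_10753/solution.py | prime_numbers_without_5
-- ===== SOURCE A (Python) =====
-- import math
--
-- def prime_numbers_without_5(n):
--     def is_prime(number):
--         if number < 2:
--             return False
--         for i in range(2, int(math.sqrt(number)) + 1):
--             if number % i == 0:
--                 return False
--         return True
--
--     prime_numbers = []
--     for number in range(2, n + 1):
--         if '5' in str(number):
--             continue
--         if is_prime(number):
--             prime_numbers.append(number)
--
--     return prime_numbers
-- ===== SOURCE B (Python) =====
-- import math
--
-- def prime_numbers_without_5(n):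
--     if n < 2:
--         return []
--     sieve = [True] * (n + 1)
--     for i in range(2, math.isqrt(n) + 1):
--         for j in range(i * i, n + 1, i):
--             sieve[j] = False
--     return [k for k in range(2, n + 1) if sieve[k] and '5' not in str(k)]
-- ===== Notes on version B (the rewrite author's own statement) =====
-- stated objective: faster
-- what changed: Replaced per-number trial division (testing every candidate against all divisors up to its square root) by a sieve: one pass over i in [2, isqrt(n)] collects all multiples i*i..n into a composite set, then a single filter keeps the non-composites without digit '5'.
import Mathlib
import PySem

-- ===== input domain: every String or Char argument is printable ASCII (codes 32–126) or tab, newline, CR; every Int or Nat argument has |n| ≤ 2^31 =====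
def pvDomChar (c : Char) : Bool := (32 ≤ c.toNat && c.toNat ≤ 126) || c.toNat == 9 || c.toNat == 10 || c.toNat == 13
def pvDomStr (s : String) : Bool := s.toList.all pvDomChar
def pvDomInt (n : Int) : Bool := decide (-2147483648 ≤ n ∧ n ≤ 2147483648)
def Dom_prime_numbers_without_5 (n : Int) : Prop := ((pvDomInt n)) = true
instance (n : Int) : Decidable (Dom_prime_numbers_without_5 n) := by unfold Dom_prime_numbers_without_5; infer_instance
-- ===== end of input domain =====

-- B replaces A's per-number trial division by a boolean sieve marking all multiples, for an asymptotic speed-up.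

-- ===== PORT A =====
-- is_prime: trial division by i in range(2, int(math.sqrt(number)) + 1).
-- int(math.sqrt(number)) is ported as Int.sqrt, exact here: for 0 ≤ number ≤ 2^31 the
-- correctly rounded double sqrt never crosses an integer, so int(math.sqrt(k)) = isqrt(k).
def pvIsPrime (number : Int) : Bool :=
  if number < 2 then false
  else (PySem.List.pyRange 2 (Int.sqrt number + 1) 1).all
    (fun i => !(PySem.Int.mod number i == 0))

def prime_numbers_without_5 (n : Int) : List Int :=
  (PySem.List.pyRange 2 (n + 1) 1).foldl
    (fun acc number =>
      if PySem.Str.isIn "5" (PySem.Int.toStr number) then acc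
      else if pvIsPrime number then acc ++ [number] else acc)
    []

-- ===== PORT B =====
-- sieve = [True] * (n + 1); for i in range(2, isqrt(n)+1): for j in range(i*i, n+1, i): sieve[j] = False.
-- The mutable Python bool list is modelled by Array Bool; every index j (and later k) read or written
-- is a nonnegative in-range Python index, so the .toNat / setIfInBounds / getD forms are exact there.
def pvSieve (n : Int) : Array Bool :=
  (PySem.List.pyRange 2 (Int.sqrt n + 1) 1).foldl
    (fun sieve i =>
      (PySem.List.pyRange (i * i) (n + 1) i).foldl
        (fun s j => s.setIfInBounds j.toNat false) sieve)
    (Array.replicate (n + 1).toNat true)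

def prime_numbers_without_5_alt (n : Int) : List Int :=
  if n < 2 then []
  else
    (PySem.List.pyRange 2 (n + 1) 1).filter
      (fun k => (pvSieve n).getD k.toNat false
                && !(PySem.Str.isIn "5" (PySem.Int.toStr k)))

-- ===== PRECONDITION & SPEC =====
def Spec_prime_numbers_without_5 (n : Int) (out : List Int) : Prop := out = prime_numbers_without_5_alt n
instance (n : Int) (out : List Int) : Decidable (Spec_prime_numbers_without_5 n out) := by unfold Spec_prime_numbers_without_5; infer_instance

-- ===== CLAIM (what is proved, stated in full; the proofs are below) =====
def Claim_equal_prime_numbers_without_5 : Prop := ∀ (n : Int), Dom_prime_numbers_without_5 n → Spec_prime_numbers_without_5 n (prime_numbers_without_5 n)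

-- ===== LEMMAS AND PROOFS =====

-- i ≤ Int.sqrt k ↔ i*i ≤ k, for nonnegative i, k (bridge to Nat.le_sqrt)
lemma pv_le_sqrt {i k : Int} (hi : 0 ≤ i) (hk : 0 ≤ k) : i ≤ Int.sqrt k ↔ i * i ≤ k := by
  have h : Int.sqrt k = ((Nat.sqrt k.toNat : Nat) : Int) := rfl
  rw [h]
  constructor
  · intro hle
    have h1 : i.toNat ≤ Nat.sqrt k.toNat := by omega
    have h2 := Nat.le_sqrt.mp h1
    have h3 : (i.toNat : Int) * (i.toNat : Int) ≤ ((k.toNat : Nat) : Int) := by exact_mod_cast h2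
    have hi' : (i.toNat : Int) = i := Int.toNat_of_nonneg hi
    have hk' : (k.toNat : Int) = k := Int.toNat_of_nonneg hk
    rw [hi', hk'] at h3; exact h3
  · intro hle
    have h2 : i.toNat * i.toNat ≤ k.toNat := by
      have hi' : (i.toNat : Int) = i := Int.toNat_of_nonneg hi
      have hk' : (k.toNat : Int) = k := Int.toNat_of_nonneg hk
      have h3 : (i.toNat : Int) * (i.toNat : Int) ≤ (k.toNat : Int) := by rw [hi', hk']; exact hle
      exact_mod_cast h3
    have := Nat.le_sqrt.mpr h2
    omega

-- reading a cell after the inner marking loop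
lemma pv_mark_getElem? (js : List Int) (a : Array Bool) (k : Nat) :
    ((js.foldl (fun s j => s.setIfInBounds j.toNat false) a)[k]?) =
    if ∃ j ∈ js, j.toNat = k then (if k < a.size then some false else none) else a[k]? := by
  induction js generalizing a with
  | nil => simp
  | cons j0 js ih =>
    rw [List.foldl_cons, ih, Array.size_setIfInBounds]
    by_cases hrest : ∃ j ∈ js, j.toNat = k
    · obtain ⟨j, hj, hjk⟩ := hrest
      have hr : ∃ j ∈ js, j.toNat = k := ⟨j, hj, hjk⟩
      have hc : ∃ j ∈ j0 :: js, j.toNat = k := ⟨j, List.mem_cons_of_mem j0 hj, hjk⟩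
      rw [if_pos hr, if_pos hc]
    · rw [if_neg hrest, Array.getElem?_setIfInBounds]
      by_cases h0 : j0.toNat = k
      · subst h0
        have hc : ∃ j ∈ j0 :: js, j.toNat = j0.toNat := ⟨j0, List.mem_cons_self, rfl⟩
        rw [if_pos rfl, if_pos hc]
      · have hc : ¬ ∃ j ∈ j0 :: js, j.toNat = k := by
          rintro ⟨j, hmem, hjk⟩
          rcases List.mem_cons.mp hmem with rfl | hj
          · exact h0 hjk
          · exact hrest ⟨j, hj, hjk⟩
        rw [if_neg h0, if_neg hc]

-- the inner loop preserves the size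
lemma pv_mark_size (js : List Int) (a : Array Bool) :
    (js.foldl (fun s j => s.setIfInBounds j.toNat false) a).size = a.size := by
  induction js generalizing a with
  | nil => rfl
  | cons j0 js ih => rw [List.foldl_cons, ih, Array.size_setIfInBounds]

-- reading a cell after the whole double loop
lemma pv_mark2_getElem? (g : Int → List Int) (l : List Int) (a : Array Bool) (k : Nat) :
    ((l.foldl (fun s i => (g i).foldl (fun s j => s.setIfInBounds j.toNat false) s) a)[k]?) =
    if ∃ i ∈ l, ∃ j ∈ g i, j.toNat = k then (if k < a.size then some false else none)
    else a[k]? := by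
  induction l generalizing a with
  | nil => simp
  | cons i0 l ih =>
    rw [List.foldl_cons, ih, pv_mark_size]
    by_cases hrest : ∃ i ∈ l, ∃ j ∈ g i, j.toNat = k
    · obtain ⟨i, hi, hj⟩ := hrest
      have hr : ∃ i ∈ l, ∃ j ∈ g i, j.toNat = k := ⟨i, hi, hj⟩
      have hc : ∃ i ∈ i0 :: l, ∃ j ∈ g i, j.toNat = k := ⟨i, List.mem_cons_of_mem i0 hi, hj⟩
      rw [if_pos hr, if_pos hc]
    · rw [if_neg hrest, pv_mark_getElem?]
      by_cases h0 : ∃ j ∈ g i0, j.toNat = k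
      · have hc : ∃ i ∈ i0 :: l, ∃ j ∈ g i, j.toNat = k := ⟨i0, List.mem_cons_self, h0⟩
        rw [if_pos h0, if_pos hc]
      · have hc : ¬ ∃ i ∈ i0 :: l, ∃ j ∈ g i, j.toNat = k := by
          rintro ⟨i, hmem, hj⟩
          rcases List.mem_cons.mp hmem with rfl | hi
          · exact h0 hj
          · exact hrest ⟨i, hi, hj⟩
        rw [if_neg h0, if_neg hc]

-- the sieve cell of 2 ≤ k ≤ n is true iff k has no divisor i with 2 ≤ i ≤ isqrt n and i*i ≤ k
lemma pv_sieve_cell (n k : Int) (h2 : 2 ≤ k) (hk : k ≤ n) :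
    ((pvSieve n).getD k.toNat false = true) ↔
    ¬ ∃ i, 2 ≤ i ∧ i ≤ Int.sqrt n ∧ i * i ≤ k ∧ i ∣ k := by
  have hklt : k.toNat < (n + 1).toNat := by omega
  have hHit : (∃ i ∈ PySem.List.pyRange 2 (Int.sqrt n + 1) 1,
      ∃ j ∈ PySem.List.pyRange (i * i) (n + 1) i, j.toNat = k.toNat) ↔
      (∃ i, 2 ≤ i ∧ i ≤ Int.sqrt n ∧ i * i ≤ k ∧ i ∣ k) := by
    constructor
    · rintro ⟨i, hi, j, hj, hjk⟩
      rw [PySem.List.mem_pyRange_one] at hi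
      rw [PySem.List.mem_pyRange_iff_of_pos (by omega : (0:Int) < i)] at hj
      obtain ⟨hj1, hj2, hj3⟩ := hj
      have hii : 0 ≤ i * i := mul_nonneg (by omega) (by omega)
      have hjk' : j = k := by omega
      subst hjk'
      refine ⟨i, by omega, by omega, hj1, ?_⟩
      have h4 : i ∣ i * i := Dvd.intro i rfl
      have h5 := dvd_add hj3 h4
      simpa using h5
    · rintro ⟨i, hi2, hisq, hik, hdvd⟩
      refine ⟨i, ?_, k, ?_, rfl⟩
      · rw [PySem.List.mem_pyRange_one]; omega
      · rw [PySem.List.mem_pyRange_iff_of_pos (by omega : (0:Int) < i)]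
        exact ⟨hik, by omega, Int.dvd_sub hdvd (Dvd.intro i rfl)⟩
  rw [Array.getD_eq_getD_getElem?]
  unfold pvSieve
  rw [pv_mark2_getElem?, Array.size_replicate]
  by_cases hhit : ∃ i ∈ PySem.List.pyRange 2 (Int.sqrt n + 1) 1,
      ∃ j ∈ PySem.List.pyRange (i * i) (n + 1) i, j.toNat = k.toNat
  · rw [if_pos hhit, if_pos hklt]
    have hyes := hHit.mp hhit
    simp [hyes]
  · rw [if_neg hhit, Array.getElem?_replicate, if_pos hklt]
    have hno : ¬ (∃ i, 2 ≤ i ∧ i ≤ Int.sqrt n ∧ i * i ≤ k ∧ i ∣ k) := fun h => hhit (hHit.mpr h)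
    simp [hno]

-- A's trial division succeeds iff no divisor in [2, isqrt k]
lemma pv_prime_true_iff (k : Int) (h2 : 2 ≤ k) :
    pvIsPrime k = true ↔ ∀ i, 2 ≤ i → i ≤ Int.sqrt k → ¬ i ∣ k := by
  unfold pvIsPrime
  rw [if_neg (by omega), List.all_eq_true]
  constructor
  · intro h i hi1 hi2 hdvd
    have hm : i ∈ PySem.List.pyRange 2 (Int.sqrt k + 1) 1 :=
      (PySem.List.mem_pyRange_one).mpr ⟨hi1, by omega⟩
    have hh := h i hm
    rw [← PySem.Int.mod_eq_zero_iff_dvd] at hdvd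
    simp [hdvd] at hh
  · intro h i hm
    rw [PySem.List.mem_pyRange_one] at hm
    have := h i hm.1 (by omega)
    rw [← PySem.Int.mod_eq_zero_iff_dvd] at this
    simp [this]

-- the filter tests agree on 2 ≤ k ≤ n
lemma pv_prime_eq (n k : Int) (h2 : 2 ≤ k) (hk : k ≤ n) :
    pvIsPrime k = (pvSieve n).getD k.toNat false := by
  have hs := pv_sieve_cell n k h2 hk
  have hp := pv_prime_true_iff k h2
  have hiff : (pvIsPrime k = true) ↔ ((pvSieve n).getD k.toNat false = true) := by
    rw [hp, hs]
    constructor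
    · rintro h ⟨i, hi2, hisq, hik, hdvd⟩
      exact h i hi2 ((pv_le_sqrt (by omega) (by omega)).mpr hik) hdvd
    · intro h i hi2 hisq hdvd
      have hik : i * i ≤ k := (pv_le_sqrt (by omega) (by omega)).mp hisq
      exact h ⟨i, hi2, (pv_le_sqrt (by omega) (by omega)).mpr (by omega), hik, hdvd⟩
  cases hb : pvIsPrime k <;> cases hc : (pvSieve n).getD k.toNat false <;> simp_all

-- A's append-loop is a filter
lemma pv_A_filter (n : Int) : prime_numbers_without_5 n =
    (PySem.List.pyRange 2 (n + 1) 1).filter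
      (fun k => !(PySem.Str.isIn "5" (PySem.Int.toStr k)) && pvIsPrime k) := by
  unfold prime_numbers_without_5
  have hbody : (fun (acc : List Int) (number : Int) =>
      if PySem.Str.isIn "5" (PySem.Int.toStr number) then acc
      else if pvIsPrime number then acc ++ [number] else acc)
      = (fun (acc : List Int) (number : Int) =>
      if (!(PySem.Str.isIn "5" (PySem.Int.toStr number)) && pvIsPrime number)
      then acc ++ [id number] else acc) := by
    funext acc number
    cases h1 : PySem.Str.isIn "5" (PySem.Int.toStr number) <;> cases h2 : pvIsPrime number <;> simp
  rw [hbody, PySem.List.foldl_append_if]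
  simp

-- ===== VERDICT (by name: the statement is the Claim_ definition above) =====
theorem prime_numbers_without_5_spec : Claim_equal_prime_numbers_without_5 := by
  intro n _
  unfold Spec_prime_numbers_without_5
  by_cases hn : n < 2
  · unfold prime_numbers_without_5 prime_numbers_without_5_alt
    rw [if_pos hn, PySem.List.pyRange_one_eq_nil (by omega)]
    simp
  · rw [pv_A_filter]
    unfold prime_numbers_without_5_alt
    rw [if_neg hn]
    apply List.filter_congr
    intro k hk
    rw [PySem.List.mem_pyRange_one] at hk
    rw [pv_prime_eq n k (by omega) (by omega)]
    exact Bool.and_comm _ _
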